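-- pv_equiv track=rewrite | github.com/LaurentRothuizen/advent-of-code | solutions/2024/day22.py | all_steps_simulation_part2
-- ===== SOURCE A (Python) =====
-- MODULO = 16777216
--
-- def mix(value, secret):
--     return value ^ secret
--
-- def prune(value):
--     return value % MODULO
--
-- def secret_number(current_secret):
--     new_secret = prune(mix(current_secret * 64, current_secret))
--     new_secret = prune(mix(new_secret//32, new_secret))
--     new_secret = prune(mix(new_secret * 2048, new_secret))
--     return new_secret
--
-- def all_steps_simulation_part2(monkey, steps):
--     new_number = monkey
--     delta = []
--     last_digit_array = []
--     last_digit = int(str(new_number)[-1])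
--     for _ in range(steps):
--         new_number = secret_number(new_number)
--         new_last_digit = int(str(new_number)[-1])
--         delta.append(new_last_digit - last_digit)
--         last_digit_array.append(new_last_digit)
--         last_digit = new_last_digit
--     return (new_number, last_digit_array, delta)
-- ===== SOURCE B (Python) =====
-- MODULO = 16777216
--
-- def mix(value, secret):
--     return value ^ secret
--
-- def prune(value):
--     return value % MODULO
--
-- def secret_number(current_secret):
--     new_secret = prune(mix(current_secret * 64, current_secret))
--     new_secret = prune(mix(new_secret//32, new_secret))
--     new_secret = prune(mix(new_secret * 2048, new_secret))
--     return new_secret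
--
-- def all_steps_simulation_part2(monkey, steps):
--     # Pass 1: generate the secret sequence only.
--     secrets = []
--     n = monkey
--     for _ in range(steps):
--         n = secret_number(n)
--         secrets.append(n)
--     # Pass 2: digits, then deltas by pairwise zip (zip truncates to len(last_digit_array)).
--     last_digit_array = [s % 10 for s in secrets]
--     prev = [abs(monkey) % 10] + last_digit_array
--     delta = [b - a for a, b in zip(prev, last_digit_array)]
--     return (n, last_digit_array, delta)
-- ===== Notes on version B (the rewrite author's own statement) =====
-- stated objective: simpler
-- what changed: Fused single loop carrying (secret, digits, deltas, last_digit) is split into a generation-only loop followed by arithmetic passes: digits via s % 10 instead of int(str(s)[-1]) and deltas via a pairwise zip over the digit list.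
import Mathlib
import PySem

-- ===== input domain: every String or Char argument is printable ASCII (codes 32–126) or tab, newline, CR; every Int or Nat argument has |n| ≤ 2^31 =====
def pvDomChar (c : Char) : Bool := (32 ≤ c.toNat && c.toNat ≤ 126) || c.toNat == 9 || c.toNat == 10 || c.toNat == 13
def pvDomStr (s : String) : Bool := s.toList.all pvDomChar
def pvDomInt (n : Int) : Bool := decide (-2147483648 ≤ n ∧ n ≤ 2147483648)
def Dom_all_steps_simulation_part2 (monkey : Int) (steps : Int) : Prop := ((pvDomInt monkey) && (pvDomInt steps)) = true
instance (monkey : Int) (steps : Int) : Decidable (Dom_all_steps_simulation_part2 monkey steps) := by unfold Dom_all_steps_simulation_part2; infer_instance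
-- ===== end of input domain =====

-- B replaces A's fused loop (secret, digits and deltas maintained together, digits via
-- int(str(n)[-1])) by a generation-only loop followed by arithmetic passes: digits via % 10
-- and deltas via a pairwise zip.  Objective: simpler (same O(steps) cost).

-- ===== PORT A =====
-- module helpers mix / prune / secret_number (shared verbatim by A and B)
def pv_MODULO : Int := 16777216

def pv_mix (value : Int) (secret : Int) : Int := PySem.Int.bxor value secret

def pv_prune (value : Int) : Int := PySem.Int.mod value pv_MODULO

def pv_secret_number (current_secret : Int) : Int :=
  let n1 := pv_prune (pv_mix (current_secret * 64) current_secret)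
  let n2 := pv_prune (pv_mix (PySem.Int.floordiv n1 32) n1)
  pv_prune (pv_mix (n2 * 2048) n2)

-- int(str(n)[-1]); str(n) is nonempty and its last char a decimal digit, so both
-- 'none' fallbacks are unreachable (Python never raises here)
def pvLastDigit (n : Int) : Int :=
  match PySem.Str.pyGet? (PySem.Int.toStr n) (-1) with
  | none => 0
  | some c => (PySem.Int.ofChars? [c]).getD 0

-- state: (new_number, delta, last_digit_array, last_digit)
def all_steps_simulation_part2 (monkey : Int) (steps : Int) : Int × List Int × List Int :=
  let new_number := monkey
  let last_digit := pvLastDigit new_number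
  let st := (PySem.List.pyRange 0 steps 1).foldl
    (fun (st : Int × List Int × List Int × Int) _ =>
      let nn := pv_secret_number st.1
      let nld := pvLastDigit nn
      (nn, st.2.1 ++ [nld - st.2.2.2], st.2.2.1 ++ [nld], nld))
    (new_number, [], [], last_digit)
  (st.1, st.2.2.1, st.2.1)

-- ===== PORT B =====
def all_steps_simulation_part2_alt (monkey : Int) (steps : Int) : Int × List Int × List Int :=
  let r := (PySem.List.pyRange 0 steps 1).foldl
    (fun (st : Int × List Int) _ =>
      let n := pv_secret_number st.1
      (n, st.2 ++ [n]))
    (monkey, [])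
  let last_digit_array := r.2.map (fun s => PySem.Int.mod s 10)
  let prev := PySem.Int.mod |monkey| 10 :: last_digit_array
  let delta := List.zipWith (fun a b => b - a) prev last_digit_array
  (r.1, last_digit_array, delta)

-- ===== PRECONDITION & SPEC =====
def Spec_all_steps_simulation_part2 (monkey : Int) (steps : Int) (out : Int × List Int × List Int) : Prop := out = all_steps_simulation_part2_alt monkey steps
instance (monkey : Int) (steps : Int) (out : Int × List Int × List Int) : Decidable (Spec_all_steps_simulation_part2 monkey steps out) := by unfold Spec_all_steps_simulation_part2; infer_instance

-- ===== CLAIM (what is proved, stated in full; the proofs are below) =====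
def Claim_equal_all_steps_simulation_part2 : Prop := ∀ (monkey : Int) (steps : Int), Dom_all_steps_simulation_part2 monkey steps → Spec_all_steps_simulation_part2 monkey steps (all_steps_simulation_part2 monkey steps)

-- ===== LEMMAS AND PROOFS =====

-- the last-digit extraction int(str(n)[-1]) computes |n| % 10
lemma tdc_getLast (b : Nat) : ∀ (f n : Nat) (c : Char) (l : List Char),
    (Nat.toDigitsCore b f n (c :: l)).getLast? = (c :: l).getLast? := by
  intro f
  induction f with
  | zero => intro n c l; simp [Nat.toDigitsCore]
  | succ f ih =>
    intro n c l
    simp only [Nat.toDigitsCore]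
    split
    · simp [List.getLast?_cons_cons]
    · rw [ih, List.getLast?_cons_cons]

lemma toDigits_getLast (n : Nat) :
    (Nat.toDigits 10 n).getLast? = some (Nat.digitChar (n % 10)) := by
  unfold Nat.toDigits
  simp only [Nat.toDigitsCore]
  split
  · simp
  · rw [tdc_getLast]; simp

lemma parse_digitChar (d : Nat) (hd : d < 10) :
    PySem.Int.ofChars? [Nat.digitChar d] = some (d : Int) := by
  interval_cases d <;> decide

lemma pvLastDigit_eq (n : Int) : pvLastDigit n = ((n.natAbs % 10 : Nat) : Int) := by
  have h : (PySem.Int.toStr n).toList.getLast? = some (Nat.digitChar (n.natAbs % 10)) := by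
    rw [PySem.Int.toList_toStr]
    unfold PySem.Int.toChars
    split
    · rw [List.getLast?_cons]
      simp [toDigits_getLast, Option.getD]
    · rw [toDigits_getLast]
      congr 2
      omega
  unfold pvLastDigit
  rw [show PySem.Str.pyGet? (PySem.Int.toStr n) (-1) = (PySem.Int.toStr n).toList.getLast? from ?_, h]
  · simp [parse_digitChar _ (Nat.mod_lt _ (by norm_num))]
  · simp [PySem.List.pyGet?_neg_one]

lemma pvLastDigit_eq_mod (m : Int) (h : 0 ≤ m) : pvLastDigit m = PySem.Int.mod m 10 := by
  rw [pvLastDigit_eq, PySem.Int.mod_eq_emod_of_pos (by norm_num)]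
  omega

lemma secret_nonneg (n : Int) : 0 ≤ pv_secret_number n := by
  unfold pv_secret_number pv_prune
  exact PySem.Int.mod_nonneg _ (by norm_num [pv_MODULO])

-- reference spec of the iteration: list of successive secrets / final secret
def pvChain (n : Int) : Nat → List Int
  | 0 => []
  | k + 1 => pv_secret_number n :: pvChain (pv_secret_number n) k

def pvFin (n : Int) : Nat → Int
  | 0 => n
  | k + 1 => pvFin (pv_secret_number n) k

def pvDeltas (d : Int) : List Int → List Int
  | [] => []
  | x :: xs => (x - d) :: pvDeltas x xs

def pvLastOf (d : Int) : List Int → Int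
  | [] => d
  | x :: xs => pvLastOf x xs

lemma loopB : ∀ (l : List Int) (n : Int) (acc : List Int),
    l.foldl (fun (st : Int × List Int) _ =>
        (pv_secret_number st.1, st.2 ++ [pv_secret_number st.1])) (n, acc)
      = (pvFin n l.length, acc ++ pvChain n l.length) := by
  intro l
  induction l with
  | nil => intro n acc; simp [pvFin, pvChain]
  | cons x xs ih => intro n acc; simp [List.foldl, ih, pvFin, pvChain]

lemma loopA : ∀ (l : List Int) (n d : Int) (D L : List Int),
    l.foldl (fun (st : Int × List Int × List Int × Int) _ =>
        let nn := pv_secret_number st.1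
        let nld := pvLastDigit nn
        (nn, st.2.1 ++ [nld - st.2.2.2], st.2.2.1 ++ [nld], nld)) (n, D, L, d)
      = (pvFin n l.length,
         D ++ pvDeltas d ((pvChain n l.length).map pvLastDigit),
         L ++ (pvChain n l.length).map pvLastDigit,
         pvLastOf d ((pvChain n l.length).map pvLastDigit)) := by
  intro l
  induction l with
  | nil => intro n d D L; simp [pvFin, pvChain, pvDeltas, pvLastOf]
  | cons x xs ih =>
    intro n d D L
    simp [List.foldl, ih, pvFin, pvChain, pvDeltas, pvLastOf]

lemma chain_map_digit : ∀ (k : Nat) (n : Int),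
    (pvChain n k).map pvLastDigit = (pvChain n k).map (fun s => PySem.Int.mod s 10) := by
  intro k
  induction k with
  | zero => intro n; simp [pvChain]
  | succ k ih =>
    intro n
    simp [pvChain, ih, pvLastDigit_eq_mod _ (secret_nonneg n)]

lemma deltas_eq_zip : ∀ (xs : List Int) (d : Int),
    pvDeltas d xs = List.zipWith (fun a b => b - a) (d :: xs) xs := by
  intro xs
  induction xs with
  | nil => intro d; simp [pvDeltas]
  | cons x xs ih => intro d; simp [pvDeltas, List.zipWith, ih]

lemma pvLastDigit_abs (monkey : Int) : pvLastDigit monkey = PySem.Int.mod |monkey| 10 := by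
  rw [pvLastDigit_eq, PySem.Int.mod_eq_emod_of_pos (by norm_num), Int.abs_eq_natAbs]
  omega

-- ===== VERDICT (by name: the statement is the Claim_ definition above) =====
theorem all_steps_simulation_part2_spec : Claim_equal_all_steps_simulation_part2 := by
  intro monkey steps _
  unfold Spec_all_steps_simulation_part2
  simp only [all_steps_simulation_part2, all_steps_simulation_part2_alt]
  rw [loopA, loopB]
  simp only [chain_map_digit, deltas_eq_zip, pvLastDigit_abs, List.nil_append]
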